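-- pv_equiv track=rewrite | github.com/Michaszek224/praktykaiszeregowaniezadan | zadanie2/algorytmy2/155275/155275.py | calculate_total_delay
-- ===== SOURCE A (Python) =====
-- def calculate_total_delay(machines, p, r, w):
--     total = 0
--     for m in range(4):
--         t = 0
--         for j in machines[m]:
--             start = max(t, r[j])
--             finish = start + p[j]
--             F = max(0, finish - r[j])
--             total += w[j] * F
--             t = finish
--     return total
-- ===== SOURCE B (Python) =====
-- def calculate_total_delay(machines, p, r, w):
--     # Max-plus reformulation: the completion time of the k-th job on a machine
--     # equals  P_k + max(0, max_{i<=k} (r[j_i] - P_{i-1}))  where P_k is the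
--     # prefix sum of processing times.  We maintain that prefix sum and running
--     # max recursively instead of simulating the running clock.
--     def go(jobs, pref, best):
--         if not jobs:
--             return 0
--         j, rest = jobs[0], jobs[1:]
--         best2 = max(best, r[j] - pref)
--         pref2 = pref + p[j]
--         return w[j] * max(0, pref2 + best2 - r[j]) + go(rest, pref2, best2)
--     return sum(go(jobs, 0, 0) for jobs in machines[:4])
-- ===== Notes on version B (the rewrite author's own statement) =====
-- stated objective: alternative
-- what changed: B replaces A's running-clock simulation (t = max(t, r[j]) + p[j] threaded through nested loops) with a max-plus closed-form recursion: it maintains a prefix sum of processing times and a running maximum of (release minus earlier prefix sum), recovering each completion time as their sum, and sums machine contributions via a recursive helper instead of the fused double loop.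
import Mathlib
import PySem

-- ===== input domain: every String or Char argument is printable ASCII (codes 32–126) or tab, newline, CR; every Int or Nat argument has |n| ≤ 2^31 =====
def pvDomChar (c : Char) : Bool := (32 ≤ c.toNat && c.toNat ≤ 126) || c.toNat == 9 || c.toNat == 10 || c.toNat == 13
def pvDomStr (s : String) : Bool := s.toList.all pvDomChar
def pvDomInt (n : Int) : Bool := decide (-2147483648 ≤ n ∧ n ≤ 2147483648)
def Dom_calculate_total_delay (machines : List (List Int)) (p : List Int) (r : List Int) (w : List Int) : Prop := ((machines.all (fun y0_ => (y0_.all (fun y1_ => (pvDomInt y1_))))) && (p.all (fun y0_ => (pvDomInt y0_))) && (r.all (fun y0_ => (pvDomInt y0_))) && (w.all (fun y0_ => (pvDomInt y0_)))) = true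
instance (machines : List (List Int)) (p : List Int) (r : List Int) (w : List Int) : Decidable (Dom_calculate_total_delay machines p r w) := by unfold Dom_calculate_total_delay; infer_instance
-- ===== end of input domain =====

-- B replaces A's running-clock simulation with a max-plus reformulation (prefix sum of
-- processing times + running max of release minus earlier prefix), as a recursion
-- (objective: alternative algorithmic formulation, same asymptotic cost).

-- ===== PORT A =====
-- for m in range(4): t = 0; for j in machines[m]: start=max(t,r[j]); finish=start+p[j];
--   F=max(0,finish-r[j]); total += w[j]*F; t = finish
def calculate_total_delay (machines : List (List Int)) (p : List Int) (r : List Int) (w : List Int) : Int :=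
  (PySem.List.pyRange 0 4 1).foldl (fun total m =>
    ((PySem.List.pyGetD machines m []).foldl
      (fun (st : Int × Int) j =>
        let start := max st.1 (PySem.List.pyGetD r j 0)
        let finish := start + PySem.List.pyGetD p j 0
        let F := max 0 (finish - PySem.List.pyGetD r j 0)
        (finish, st.2 + PySem.List.pyGetD w j 0 * F))
      (0, total)).2) 0

-- ===== PORT B =====
-- go(jobs, pref, best): recursion carrying the prefix sum of p and the running max of
-- (r[j] - earlier prefix); the completion time is pref2 + best2.
def pvGo (p r w : List Int) : List Int → Int → Int → Int
  | [], _, _ => 0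
  | j :: rest, pref, best =>
    let best2 := max best (PySem.List.pyGetD r j 0 - pref)
    let pref2 := pref + PySem.List.pyGetD p j 0
    PySem.List.pyGetD w j 0 * max 0 (pref2 + best2 - PySem.List.pyGetD r j 0)
      + pvGo p r w rest pref2 best2

-- return sum(go(jobs, 0, 0) for jobs in machines[:4])
def calculate_total_delay_alt (machines : List (List Int)) (p : List Int) (r : List Int) (w : List Int) : Int :=
  ((PySem.List.slice machines none (some 4)).map (fun jobs => pvGo p r w jobs 0 0)).sum

-- ===== PRECONDITION & SPEC =====
-- Pre_: Python A raises IndexError unless machines has at least 4 lists and every job index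
-- in the first 4 lists is a valid Python index into p, r and w; exactly those inputs are excluded.
def Pre_calculate_total_delay (machines : List (List Int)) (p : List Int) (r : List Int) (w : List Int) : Prop :=
  4 ≤ machines.length ∧
  ∀ m ∈ machines.take 4, ∀ j ∈ m,
    PySem.Raise.InRange p.length j ∧ PySem.Raise.InRange r.length j ∧ PySem.Raise.InRange w.length j
instance (machines : List (List Int)) (p : List Int) (r : List Int) (w : List Int) : Decidable (Pre_calculate_total_delay machines p r w) := by unfold Pre_calculate_total_delay; infer_instance

def pvWitness_calculate_total_delay : List (List Int) × List Int × List Int × List Int :=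
  ([[0, 1], [2], [], [0]], [3, 1, 4], [0, 2, 1], [2, 5, 1])

def Spec_calculate_total_delay (machines : List (List Int)) (p : List Int) (r : List Int) (w : List Int) (out : Int) : Prop := out = calculate_total_delay_alt machines p r w
instance (machines : List (List Int)) (p : List Int) (r : List Int) (w : List Int) (out : Int) : Decidable (Spec_calculate_total_delay machines p r w out) := by unfold Spec_calculate_total_delay; infer_instance

-- ===== CLAIM (what is proved, stated in full; the proofs are below) =====
def Claim_equal_calculate_total_delay : Prop := ∀ (machines : List (List Int)) (p : List Int) (r : List Int) (w : List Int), Dom_calculate_total_delay machines p r w → Pre_calculate_total_delay machines p r w → Spec_calculate_total_delay machines p r w (calculate_total_delay machines p r w)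

-- ===== LEMMAS AND PROOFS =====

-- A's per-machine fold started at clock t = pref + best equals B's recursion from (pref, best).
theorem pv_machine_eq (p r w : List Int) (js : List Int) :
    ∀ (pref best total : Int),
      (js.foldl
        (fun (st : Int × Int) j =>
          let start := max st.1 (PySem.List.pyGetD r j 0)
          let finish := start + PySem.List.pyGetD p j 0
          let F := max 0 (finish - PySem.List.pyGetD r j 0)
          (finish, st.2 + PySem.List.pyGetD w j 0 * F))
        (pref + best, total)).2
      = total + pvGo p r w js pref best := by
  induction js with
  | nil => intro pref best total; simp [pvGo]
  | cons j js ih =>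
    intro pref best total
    simp only [List.foldl_cons, pvGo]
    have h : max (pref + best) (PySem.List.pyGetD r j 0) + PySem.List.pyGetD p j 0
        = (pref + PySem.List.pyGetD p j 0) + max best (PySem.List.pyGetD r j 0 - pref) := by
      omega
    rw [h, ih]
    ring

theorem calculate_total_delay_spec : Claim_equal_calculate_total_delay := by
  unfold Claim_equal_calculate_total_delay
  intro machines p r w _hdom hpre
  obtain ⟨hlen, _⟩ := hpre
  match machines, hlen with
  | m0 :: m1 :: m2 :: m3 :: rest, _ =>
    unfold Spec_calculate_total_delay calculate_total_delay calculate_total_delay_alt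
    have hr : PySem.List.pyRange 0 4 1 = [0, 1, 2, 3] := by decide
    have hs : PySem.List.slice (m0 :: m1 :: m2 :: m3 :: rest) none (some 4) = [m0, m1, m2, m3] := by
      rw [show ((4:Int) = ((4:Nat):Int)) from by norm_num, PySem.List.slice_to_natCast]
      rfl
    have h0 : PySem.List.pyGetD (m0 :: m1 :: m2 :: m3 :: rest) 0 [] = m0 := by
      have h : (0:Int) ≤ (rest.length:Int) + 1 + 1 + 1 := by omega
      simp [PySem.List.pyGetD, PySem.List.pyGet?, PySem.List.pyIdx?, h]
    have h1 : PySem.List.pyGetD (m0 :: m1 :: m2 :: m3 :: rest) 1 [] = m1 := by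
      have h' : (1:Int) < (rest.length:Int) + 1 + 1 + 1 + 1 := by omega
      simp [PySem.List.pyGetD, PySem.List.pyGet?, PySem.List.pyIdx?, h']
    have h2 : PySem.List.pyGetD (m0 :: m1 :: m2 :: m3 :: rest) 2 [] = m2 := by
      have h : (2:Int) ≤ (rest.length:Int) + 1 + 1 + 1 := by omega
      simp [PySem.List.pyGetD, PySem.List.pyGet?, PySem.List.pyIdx?, h]
    have h3 : PySem.List.pyGetD (m0 :: m1 :: m2 :: m3 :: rest) 3 [] = m3 := by
      have h : (3:Int) ≤ (rest.length:Int) + 1 + 1 + 1 := by omega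
      simp [PySem.List.pyGetD, PySem.List.pyGet?, PySem.List.pyIdx?, h]
    rw [hr, hs]
    simp only [List.foldl_cons, List.foldl_nil, List.map_cons, List.map_nil, List.sum_cons,
      List.sum_nil, h0, h1, h2, h3]
    have e : ∀ (js : List Int) (total : Int),
        (js.foldl
          (fun (st : Int × Int) j =>
            let start := max st.1 (PySem.List.pyGetD r j 0)
            let finish := start + PySem.List.pyGetD p j 0
            let F := max 0 (finish - PySem.List.pyGetD r j 0)
            (finish, st.2 + PySem.List.pyGetD w j 0 * F))
          (0, total)).2 = total + pvGo p r w js 0 0 := by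
      intro js total
      have := pv_machine_eq p r w js 0 0 total
      simpa using this
    rw [e, e, e, e]
    ring
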